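-- pv_equiv track=rewrite | github.com/leedabin2/algorithm | 1로 만들기 2.py | shorts_lst
-- ===== SOURCE A (Python) =====
-- def shorts_lst(new_lst):
--     shortest = len(new_lst[0])  # 기준 설정
--     shortest_lst = []  # 최단 길이를 가진 원소 저장 리스트
--     for i in new_lst:
--         if len(i) <= shortest and i[0] == 1:
--             if len(i) < shortest:
--                 shortest = len(i) # 기준 재설정
--                 shortest_lst = [i]
--             else:
--                 shortest_lst.append(i)
--     return shortest_lst
-- ===== SOURCE B (Python) =====
-- def shorts_lst(new_lst):
--     threshold = len(new_lst[0])
--     candidates = [i for i in new_lst if len(i) <= threshold and i[0] == 1]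
--     if not candidates:
--         return []
--     m = min(len(i) for i in candidates)
--     return [i for i in candidates if len(i) == m]
-- ===== Notes on version B (the rewrite author's own statement) =====
-- stated objective: simpler
-- what changed: Replaces A's single scan with a mutable decreasing threshold and in-place accumulator reset by a plain filter (fixed threshold len(new_lst[0])) -> min of candidate lengths -> filter of the candidates with that minimum length.
import Mathlib
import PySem

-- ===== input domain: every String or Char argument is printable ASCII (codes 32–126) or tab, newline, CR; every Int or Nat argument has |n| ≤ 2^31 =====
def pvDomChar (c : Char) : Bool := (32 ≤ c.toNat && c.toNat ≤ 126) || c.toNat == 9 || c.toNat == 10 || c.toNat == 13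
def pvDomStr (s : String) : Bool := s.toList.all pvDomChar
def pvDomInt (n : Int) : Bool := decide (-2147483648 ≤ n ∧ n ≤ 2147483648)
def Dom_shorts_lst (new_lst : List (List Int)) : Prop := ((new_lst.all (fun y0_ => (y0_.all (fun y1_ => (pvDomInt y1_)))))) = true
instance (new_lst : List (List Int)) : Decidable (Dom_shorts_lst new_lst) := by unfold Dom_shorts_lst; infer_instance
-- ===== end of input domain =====

-- B replaces A's single scan with a mutable decreasing threshold (and in-place accumulator
-- reset) by a plain filter → min → filter decomposition; same cost, simpler.

-- ===== PORT A =====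
-- i[0] is ported as i.headD 0, exact on nonempty i; Pre_ excludes the inputs (empty
-- new_lst, an empty inner list) on which Python raises IndexError.
def shorts_lst (new_lst : List (List Int)) : List (List Int) :=
  let shortest : Nat := (new_lst.headD []).length
  let st := new_lst.foldl
    (fun (st : Nat × List (List Int)) (i : List Int) =>
      if i.length ≤ st.1 ∧ i.headD 0 = 1 then
        if i.length < st.1 then (i.length, [i]) else (st.1, st.2 ++ [i])
      else st)
    (shortest, [])
  st.2

-- ===== PORT B =====
-- Python's min over a nonempty list is ported as pyMinNat, a foldl of Nat.min
-- (its [] branch is unreachable in B: candidates ≠ []).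
def pyMinNat (l : List Nat) : Nat :=
  match l with
  | [] => 0
  | x :: xs => xs.foldl Nat.min x

def shorts_lst_alt (new_lst : List (List Int)) : List (List Int) :=
  let threshold : Nat := (new_lst.headD []).length
  let candidates := new_lst.filter (fun i => i.length ≤ threshold && i.headD 0 == 1)
  if candidates = [] then []
  else
    let m : Nat := pyMinNat (candidates.map (fun i => i.length))
    candidates.filter (fun i => i.length == m)

-- ===== PRECONDITION & SPEC =====
-- Pre_ excludes exactly the inputs where Python A raises IndexError: empty new_lst
-- (new_lst[0]) and any empty inner list (i[0], reached since len(i)=0 ≤ shortest).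
def Pre_shorts_lst (new_lst : List (List Int)) : Prop :=
  new_lst ≠ [] ∧ ∀ i ∈ new_lst, i ≠ []
instance (new_lst : List (List Int)) : Decidable (Pre_shorts_lst new_lst) := by
  unfold Pre_shorts_lst; infer_instance
def pvWitness_shorts_lst : List (List Int) := [[1, 2], [1], [2]]

def Spec_shorts_lst (new_lst : List (List Int)) (out : List (List Int)) : Prop := out = shorts_lst_alt new_lst
instance (new_lst : List (List Int)) (out : List (List Int)) : Decidable (Spec_shorts_lst new_lst out) := by unfold Spec_shorts_lst; infer_instance

-- ===== CLAIM (what is proved, stated in full; the proofs are below) =====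
def Claim_equal_shorts_lst : Prop := ∀ (new_lst : List (List Int)), Dom_shorts_lst new_lst → Pre_shorts_lst new_lst → Spec_shorts_lst new_lst (shorts_lst new_lst)

-- ===== LEMMAS AND PROOFS =====

-- running minimum of len(new_lst[0]) and the lengths of the 1-headed elements
def bestLen (m : Nat) (l : List (List Int)) : Nat :=
  l.foldl (fun b i => if i.headD 0 = 1 then Nat.min b i.length else b) m

lemma bestLen_nil (m : Nat) : bestLen m [] = m := rfl

lemma bestLen_cons (m : Nat) (i : List Int) (t : List (List Int)) :
    bestLen m (i :: t) = bestLen (if i.headD 0 = 1 then Nat.min m i.length else m) t := rfl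

lemma bestLen_le (l : List (List Int)) : ∀ m : Nat, bestLen m l ≤ m := by
  induction l with
  | nil => intro m; simp [bestLen_nil]
  | cons i t ih =>
    intro m
    rw [bestLen_cons]
    split
    · exact le_trans (ih _) (Nat.min_le_left _ _)
    · exact ih m

-- invariant of A's loop
lemma loopA (l : List (List Int)) : ∀ (m : Nat) (acc : List (List Int)),
    (l.foldl
      (fun (st : Nat × List (List Int)) (i : List Int) =>
        if i.length ≤ st.1 ∧ i.headD 0 = 1 then
          if i.length < st.1 then (i.length, [i]) else (st.1, st.2 ++ [i])
        else st)
      (m, acc)).2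
    = (if bestLen m l = m then acc else [])
        ++ l.filter (fun i => i.headD 0 == 1 && i.length == bestLen m l) := by
  induction l with
  | nil => intro m acc; simp [bestLen_nil]
  | cons i t ih =>
    intro m acc
    by_cases h1 : i.headD 0 = 1
    · have h1' : i.head?.getD 0 = 1 := by rwa [List.headD_eq_head?] at h1
      by_cases hle : i.length ≤ m
      · by_cases hlt : i.length < m
        · -- reset branch
          have hb : bestLen m (i :: t) = bestLen i.length t := by
            rw [bestLen_cons]; simp [h1', Nat.min_eq_right (le_of_lt hlt)]
          have hble : bestLen i.length t ≤ i.length := bestLen_le t _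
          simp only [List.foldl_cons, if_pos (And.intro hle h1), if_pos hlt]
          rw [ih i.length [i], hb]
          have hne : ¬ bestLen i.length t = m := by omega
          rw [if_neg hne]
          rw [List.filter_cons]
          by_cases heq : bestLen i.length t = i.length
          · simp [h1', heq]
          · have : ¬ (i.length = bestLen i.length t) := fun h => heq h.symm
            simp [h1', heq, this]
        · -- append branch: i.length = m
          have hm : i.length = m := by omega
          have hb : bestLen m (i :: t) = bestLen m t := by
            rw [bestLen_cons]; simp [h1', hm]
          simp only [List.foldl_cons, if_pos (And.intro hle h1), if_neg hlt]
          rw [ih m (acc ++ [i]), hb]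
          rw [List.filter_cons]
          by_cases heq : bestLen m t = m
          · simp [h1', hm, heq, List.append_assoc]
          · have : ¬ (i.length = bestLen m t) := by omega
            simp [h1', heq, this]
      · -- skipped: too long
        have hb : bestLen m (i :: t) = bestLen m t := by
          rw [bestLen_cons]; simp [h1', Nat.min_eq_left (by omega : m ≤ i.length)]
        have hcond : ¬ (i.length ≤ m ∧ i.headD 0 = 1) := fun h => hle h.1
        simp only [List.foldl_cons, if_neg hcond]
        rw [ih m acc, hb, List.filter_cons]
        have hble : bestLen m t ≤ m := bestLen_le t m
        have : ¬ (i.length = bestLen m t) := by omega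
        simp [h1', this]
    · -- skipped: head not 1
      have h1' : ¬ i.head?.getD 0 = 1 := by rwa [List.headD_eq_head?] at h1
      have hb : bestLen m (i :: t) = bestLen m t := by
        rw [bestLen_cons]; simp [h1']
      have hcond : ¬ (i.length ≤ m ∧ i.headD 0 = 1) := fun h => h1 h.2
      simp only [List.foldl_cons, if_neg hcond]
      rw [ih m acc, hb, List.filter_cons]
      simp [h1']

-- A's result is: all 1-headed elements of length bestLen
lemma shorts_lst_eq (new_lst : List (List Int)) :
    shorts_lst new_lst
    = new_lst.filter (fun i =>
        i.headD 0 == 1 && i.length == bestLen (new_lst.headD []).length new_lst) := by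
  unfold shorts_lst
  rw [loopA]
  split <;> simp

-- dropping the ≤ θ test does not change the running minimum, as long as it stays ≤ θ
lemma bestLen_eq_minsCand (θ : Nat) (l : List (List Int)) : ∀ m : Nat, m ≤ θ →
    bestLen m l
    = (l.filter (fun i => i.length ≤ θ && i.headD 0 == 1)).foldl
        (fun b i => Nat.min b i.length) m := by
  induction l with
  | nil => intro m _; rfl
  | cons i t ih =>
    intro m hm
    rw [bestLen_cons, List.filter_cons]
    by_cases h1 : i.headD 0 = 1
    · have h1' : i.head?.getD 0 = 1 := by rwa [List.headD_eq_head?] at h1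
      rw [if_pos h1]
      by_cases hle : i.length ≤ θ
      · have : (decide (i.length ≤ θ) && (i.headD 0 == 1)) = true := by
          simp [h1', hle]
        rw [if_pos this, List.foldl_cons]
        exact ih (Nat.min m i.length) (le_trans (Nat.min_le_left _ _) hm)
      · have hmin : Nat.min m i.length = m := Nat.min_eq_left (by omega)
        have : ¬ ((decide (i.length ≤ θ) && (i.headD 0 == 1)) = true) := by
          simp [hle]
        rw [hmin, if_neg this]
        exact ih m hm
    · have h1' : ¬ i.head?.getD 0 = 1 := by rwa [List.headD_eq_head?] at h1
      rw [if_neg h1]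
      have : ¬ ((decide (i.length ≤ θ) && (i.headD 0 == 1)) = true) := by
        simp [h1']
      rw [if_neg this]
      exact ih m hm

lemma altEq (l : List (List Int)) (θ : Nat) :
    (if l.filter (fun i => i.length ≤ θ && i.headD 0 == 1) = [] then []
     else (l.filter (fun i => i.length ≤ θ && i.headD 0 == 1)).filter
       (fun i => i.length ==
         pyMinNat ((l.filter (fun i => i.length ≤ θ && i.headD 0 == 1)).map (fun i => i.length))))
    = l.filter (fun i => i.headD 0 == 1 && i.length == bestLen θ l) := by
  set cands := l.filter (fun i => i.length ≤ θ && i.headD 0 == 1) with hc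
  set b := bestLen θ l with hb
  have hble : b ≤ θ := bestLen_le l θ
  by_cases hnil : cands = []
  · rw [if_pos hnil]
    symm
    rw [List.filter_eq_nil_iff]
    intro i hi hcond
    simp only [Bool.and_eq_true, beq_iff_eq] at hcond
    have : i ∈ cands := by
      rw [hc, List.mem_filter]
      refine ⟨hi, ?_⟩
      simp only [Bool.and_eq_true, decide_eq_true_eq, beq_iff_eq]
      exact ⟨by omega, hcond.1⟩
    rw [hnil] at this; exact absurd this (List.not_mem_nil)
  · rw [if_neg hnil]
    obtain ⟨c, cs, hcc⟩ := List.exists_cons_of_ne_nil hnil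
    have hcθ : c.length ≤ θ := by
      have hcm : c ∈ cands := by rw [hcc]; exact List.mem_cons_self
      rw [hc, List.mem_filter] at hcm
      have h2 := hcm.2
      simp only [Bool.and_eq_true, decide_eq_true_eq] at h2
      exact h2.1
    -- the value pyMinNat computes for B equals b
    have hm : pyMinNat (cands.map (fun i => i.length)) = b := by
      rw [hcc]
      simp only [List.map_cons, pyMinNat]
      rw [hb, bestLen_eq_minsCand θ l θ le_rfl, ← hc, hcc, List.foldl_cons]
      have hminθ : θ.min c.length = c.length := Nat.min_eq_right hcθ
      rw [hminθ, List.foldl_map]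
    rw [hm, hc, List.filter_filter]
    symm
    apply List.filter_congr
    intro i hi
    by_cases hlb : i.length = b
    · have hiθ : i.length ≤ θ := by omega
      simp only [hlb]
      simp [hble]
    · have hf : (i.length == b) = false := by simpa using hlb
      simp [hf]

-- ===== VERDICT (by name: the statement is the Claim_ definition above) =====
theorem shorts_lst_spec : Claim_equal_shorts_lst := by
  intro new_lst _ _
  show shorts_lst new_lst = shorts_lst_alt new_lst
  exact (shorts_lst_eq new_lst).trans (altEq new_lst (new_lst.headD []).length).symm
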